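-- pv_equiv track=rewrite | github.com/StephenETaylor/SE26-5 | baseline/train4.py | compressed_choices
-- ===== SOURCE A (Python) =====
-- def compressed_choices(choise):
--     """
--     Take a list of 5 ints, each in the range(1,6)
--     and return an int
--     """
--     choices = list(choise)  # make a copy, rather than changing input data
--     for i,c in enumerate(choices):
--         if c<1:
--             choices[i] = 1
--         if c>5:
--             choices[i] = 5
--     choices.sort()
--     lc = len(choices)
--     if lc > 5:
--         choices = choices[-5:]
--     elif lc < 5 and lc > 0:
--         choices = ([choices[0]]*(5-lc)) + choices
--     if len(choices) != 5:
--         complain()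
--     retval = 0
--     for i,c in enumerate(choices):
--         retval |= int(c)<<3*i
--     return retval
-- ===== SOURCE B (Python) =====
-- def compressed_choices(choise):
--     """
--     Take a list of 5 ints, each in the range(1,6)
--     and return an int
--     """
--     # tally the clamped values instead of copying + comparison-sorting
--     counts = [0] * 6
--     for c in choise:
--         counts[1 if c < 1 else 5 if c > 5 else c] += 1
--     seq = []
--     for v in range(1, 6):
--         seq += [v] * counts[v]
--     if not seq:
--         raise ValueError("empty choices")
--     # pad five copies of the minimum in front, then keep the last five:
--     # this realises both the 'keep 5 largest' and 'left-pad with the minimum'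
--     # cases of the spec without any branching
--     seq = [seq[0]] * 5 + seq
--     seq = seq[-5:]
--     # pack back-to-front by Horner's rule (values < 8, so *8 == the 3-bit shifts)
--     retval = 0
--     for v in reversed(seq):
--         retval = retval * 8 + v
--     return retval
-- ===== Notes on version B (the rewrite author's own statement) =====
-- stated objective: alternative
-- what changed: Replaces copy-clamp-then-comparison-sort by a counting-sort tally counts[1..5], replaces A's three-way truncate/pad branches by one branch-free 'pad five copies of the minimum then take the last five' step, and replaces the enumerate/shift/bit-or packing by a reversed Horner multiply-add.
import Mathlib
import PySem

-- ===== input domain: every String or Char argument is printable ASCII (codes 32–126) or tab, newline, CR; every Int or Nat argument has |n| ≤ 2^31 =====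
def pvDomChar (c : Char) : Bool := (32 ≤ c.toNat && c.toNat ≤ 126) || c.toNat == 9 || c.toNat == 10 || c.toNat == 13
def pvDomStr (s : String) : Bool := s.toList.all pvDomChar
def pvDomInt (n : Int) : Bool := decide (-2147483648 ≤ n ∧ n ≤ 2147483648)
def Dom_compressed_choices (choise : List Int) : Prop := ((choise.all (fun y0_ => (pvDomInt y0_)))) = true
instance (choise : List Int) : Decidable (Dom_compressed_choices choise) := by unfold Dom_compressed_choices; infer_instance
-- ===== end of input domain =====

-- B replaces A's copy-clamp-then-sort by a one-pass tally counts[1..5] (counting sort), replaces the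
-- truncate/pad branches by a branch-free pad-then-slice, and packs by reversed Horner instead of bit-or.


-- ===== PORT A =====
def compressed_choices (choise : List Int) : Int :=
  -- 'for i,c in enumerate(choices): if c<1 … if c>5 …' rewrites each slot in place: ported as a map
  let choices := choise.map (fun c =>
    let c1 := if c < 1 then (1 : Int) else c
    if c1 > 5 then (5 : Int) else c1)
  let choices := PySem.List.sorted choices (fun x => x) false
  let lc : Int := (choices.length : Int)
  let choices :=
    if lc > 5 then PySem.List.slice choices (some (-5)) none
    else if lc < 5 ∧ lc > 0 then
      -- choices[0]: lc > 0 in this branch, so pyGetD's default is never used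
      List.replicate (5 - lc).toNat (PySem.List.pyGetD choices 0 0) ++ choices
    else choices
  -- if len(choices) != 5: complain()  -- NameError on the empty input; excluded by Pre_ below
  (PySem.List.enumerate choices 0).foldl
    (fun retval p => PySem.Int.bor retval (p.2 <<< (3 * p.1).toNat)) 0

-- ===== PORT B =====
def compressed_choices_alt (choise : List Int) : Int :=
  -- counts[v] += 1 on the clamped value
  let counts := choise.foldl (fun cs c =>
    let v := if c < 1 then (1 : Int) else if c > 5 then (5 : Int) else c
    cs.set v.toNat (cs.getD v.toNat 0 + 1)) (List.replicate 6 (0 : Int))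
  -- seq += [v] * counts[v] for v in range(1, 6)
  let seq := (PySem.List.pyRange 1 6 1).foldl
    (fun acc v => acc ++ List.replicate (counts.getD v.toNat 0).toNat v) ([] : List Int)
  -- if not seq: raise ValueError  -- only on the empty input; excluded by Pre_ below
  -- seq = [seq[0]] * 5 + seq; seq = seq[-5:]
  let seq := List.replicate 5 (PySem.List.pyGetD seq 0 0) ++ seq
  let seq := PySem.List.slice seq (some (-5)) none
  -- for v in reversed(seq): retval = retval * 8 + v
  seq.reverse.foldl (fun retval v => retval * 8 + v) 0

-- ===== PRECONDITION & SPEC =====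
-- Pre_ excludes only the empty list, on which A calls the undefined helper complain() and raises
-- NameError (B raises ValueError there).
def Pre_compressed_choices (choise : List Int) : Prop := choise ≠ []
instance (choise : List Int) : Decidable (Pre_compressed_choices choise) := by unfold Pre_compressed_choices; infer_instance
def pvWitness_compressed_choices : List Int := [3, 1, 7]

def Spec_compressed_choices (choise : List Int) (out : Int) : Prop := out = compressed_choices_alt choise
instance (choise : List Int) (out : Int) : Decidable (Spec_compressed_choices choise out) := by unfold Spec_compressed_choices; infer_instance

-- ===== CLAIM (what is proved, stated in full; the proofs are below) =====
def Claim_equal_compressed_choices : Prop := ∀ (choise : List Int), Dom_compressed_choices choise → Pre_compressed_choices choise → Spec_compressed_choices choise (compressed_choices choise)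

-- ===== LEMMAS AND PROOFS =====

/-- Python's clamp of one value into [1,5]. -/
def pvClamp (c : Int) : Int := if c < 1 then 1 else if c > 5 then 5 else c

lemma pvClamp_mem (c : Int) : 1 ≤ pvClamp c ∧ pvClamp c ≤ 5 := by
  unfold pvClamp; split_ifs <;> omega

lemma clampA_eq (c : Int) :
    (let c1 := if c < 1 then (1 : Int) else c; if c1 > 5 then (5 : Int) else c1) = pvClamp c := by
  show (if (if c < 1 then (1:Int) else c) > 5 then (5:Int) else (if c < 1 then (1:Int) else c)) = pvClamp c
  unfold pvClamp; split_ifs <;> omega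

/-- counting sort: a list with all elements in [1,5] sorts to the concatenation of replicates. -/
lemma sorted_counting (xs : List Int) (h : ∀ x ∈ xs, 1 ≤ x ∧ x ≤ 5) :
    PySem.List.sorted xs (fun x => x) false =
      List.replicate (xs.count 1) 1 ++ List.replicate (xs.count 2) 2 ++
      List.replicate (xs.count 3) 3 ++ List.replicate (xs.count 4) 4 ++
      List.replicate (xs.count 5) 5 := by
  apply PySem.List.sorted_id_eq_of_perm_of_pairwise
  · rw [List.perm_iff_count]
    intro a
    simp only [List.count_append, List.count_replicate]
    by_cases h1 : a = 1
    · subst h1; simp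
    · by_cases h2 : a = 2
      · subst h2; simp
      · by_cases h3 : a = 3
        · subst h3; simp
        · by_cases h4 : a = 4
          · subst h4; simp
          · by_cases h5 : a = 5
            · subst h5; simp
            · have : a ∉ xs := fun hm => by have := h a hm; omega
              simp [List.count_eq_zero.mpr this]
              · omega
  · have hrep : ∀ (n : ℕ) (u : Int), List.Pairwise (fun a b => a ≤ b) (List.replicate n u) := by
      intro n u; rw [List.pairwise_replicate]; omega
    have happ : ∀ (l₁ l₂ : List Int), List.Pairwise (fun a b => a ≤ b) l₁ →
        List.Pairwise (fun a b => a ≤ b) l₂ → (∀ x ∈ l₁, ∀ y ∈ l₂, x ≤ y) →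
        List.Pairwise (fun a b => a ≤ b) (l₁ ++ l₂) := by
      intro l₁ l₂ h₁ h₂ h₁₂; rw [List.pairwise_append]; exact ⟨h₁, h₂, h₁₂⟩
    apply happ; apply happ; apply happ; apply happ
    all_goals first | exact hrep _ _ | skip
    all_goals intro x hx y hy
    all_goals simp only [List.mem_append, List.mem_replicate] at hx hy
    all_goals omega

/-- the tally fold computes the counts of the clamped list, on top of any 6-entry table. -/
lemma tally_fold (xs : List Int) (a b c d e f : Int) :
    xs.foldl (fun cs c =>
        let v := if c < 1 then (1 : Int) else if c > 5 then (5 : Int) else c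
        cs.set v.toNat (cs.getD v.toNat 0 + 1)) [a, b, c, d, e, f] =
      [a, b + ((xs.map pvClamp).count 1 : Int), c + ((xs.map pvClamp).count 2 : Int),
       d + ((xs.map pvClamp).count 3 : Int), e + ((xs.map pvClamp).count 4 : Int),
       f + ((xs.map pvClamp).count 5 : Int)] := by
  induction xs generalizing a b c d e f with
  | nil => simp
  | cons x xs ih =>
    rw [List.foldl_cons]
    have hstep : (let v := if x < 1 then (1 : Int) else if x > 5 then (5 : Int) else x
        List.set [a, b, c, d, e, f] v.toNat (List.getD [a, b, c, d, e, f] v.toNat 0 + 1)) =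
        List.set [a, b, c, d, e, f] (pvClamp x).toNat
          (List.getD [a, b, c, d, e, f] (pvClamp x).toNat 0 + 1) := rfl
    rw [hstep, List.map_cons]
    obtain ⟨v, hv', hb1, hb2⟩ : ∃ v, pvClamp x = v ∧ 1 ≤ v ∧ v ≤ 5 :=
      ⟨_, rfl, pvClamp_mem x⟩
    rw [hv']
    interval_cases v
    · rw [show List.set [a,b,c,d,e,f] ((1:Int)).toNat
          (List.getD [a,b,c,d,e,f] ((1:Int)).toNat 0 + 1) = [a,b+1,c,d,e,f] from rfl, ih]
      simp; omega
    · rw [show List.set [a,b,c,d,e,f] ((2:Int)).toNat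
          (List.getD [a,b,c,d,e,f] ((2:Int)).toNat 0 + 1) = [a,b,c+1,d,e,f] from rfl, ih]
      simp; omega
    · rw [show List.set [a,b,c,d,e,f] ((3:Int)).toNat
          (List.getD [a,b,c,d,e,f] ((3:Int)).toNat 0 + 1) = [a,b,c,d+1,e,f] from rfl, ih]
      simp; omega
    · rw [show List.set [a,b,c,d,e,f] ((4:Int)).toNat
          (List.getD [a,b,c,d,e,f] ((4:Int)).toNat 0 + 1) = [a,b,c,d,e+1,f] from rfl, ih]
      simp; omega
    · rw [show List.set [a,b,c,d,e,f] ((5:Int)).toNat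
          (List.getD [a,b,c,d,e,f] ((5:Int)).toNat 0 + 1) = [a,b,c,d,e,f+1] from rfl, ih]
      simp; omega

/-- B's range loop rebuilds the ascending replicate concatenation from the table. -/
lemma seq_fold (m1 m2 m3 m4 m5 : Nat) :
    (PySem.List.pyRange 1 6 1).foldl
      (fun acc v => acc ++ List.replicate (([0, (m1:Int), m2, m3, m4, m5].getD v.toNat 0)).toNat v)
      ([] : List Int) =
      List.replicate m1 1 ++ List.replicate m2 2 ++ List.replicate m3 3 ++
      List.replicate m4 4 ++ List.replicate m5 5 := by
  rw [show PySem.List.pyRange 1 6 1 = [1, 2, 3, 4, 5] from rfl]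
  simp [List.foldl]

/-- A's three-way truncate/pad equals B's branch-free pad-five-then-take-last-five. -/
lemma lists_eq (S : List Int) (hS : S ≠ []) :
    (if ((S.length : Int)) > 5 then PySem.List.slice S (some (-5)) none
     else if ((S.length : Int)) < 5 ∧ ((S.length : Int)) > 0 then
       List.replicate (5 - ((S.length : Int))).toNat (PySem.List.pyGetD S 0 0) ++ S
     else S) =
    PySem.List.slice (List.replicate 5 (PySem.List.pyGetD S 0 0) ++ S) (some (-5)) none := by
  have hS0 : S.length ≠ 0 := fun h => hS (List.eq_nil_of_length_eq_zero h)
  rw [PySem.List.slice_from_neg_ofNat (List.replicate 5 (PySem.List.pyGetD S 0 0) ++ S) 5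
    (by omega)]
  rw [show (List.replicate 5 (PySem.List.pyGetD S 0 0) ++ S).length - 5 = S.length from by
    simp]
  rw [List.drop_append, List.drop_replicate, List.length_replicate]
  by_cases h5 : (S.length : Int) > 5
  · rw [if_pos h5, PySem.List.slice_from_neg_ofNat S 5 (by omega)]
    rw [show 5 - S.length = 0 from by omega]
    simp
  · rw [if_neg h5]
    by_cases hlt : (S.length : Int) < 5 ∧ (S.length : Int) > 0
    · rw [if_pos hlt]
      rw [show ((5 : Int) - (S.length : Int)).toNat = 5 - S.length from by omega,
        show S.length - 5 = 0 from by omega, List.drop_zero]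
    · rw [if_neg hlt]
      rw [show 5 - S.length = 0 from by omega, show S.length - 5 = 0 from by omega]
      simp

/-- disjoint bit-or on Nat is addition. -/
lemma lor_disjoint (k x y : Nat) (hx : x < 2 ^ k) : x ||| (y * 2 ^ k) = x + y * 2 ^ k := by
  induction k generalizing x y with
  | zero =>
    have : x = 0 := by simpa using hx
    simp [this]
  | succ k ih =>
    have hdecomp : Nat.bit (x.testBit 0) (x >>> 1) = x := Nat.bit_testBit_zero_shiftRight_one x
    have hpow : y * 2 ^ (k + 1) = 2 * (y * 2 ^ k) := by rw [Nat.pow_succ]; ring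
    have h2 : y * 2 ^ (k + 1) = Nat.bit false (y * 2 ^ k) := by rw [Nat.bit_val, hpow]; simp
    have hx2 : x >>> 1 < 2 ^ k := by
      rw [Nat.shiftRight_one]
      have : x < 2 ^ k * 2 := by rw [← Nat.pow_succ]; exact hx
      omega
    calc x ||| y * 2 ^ (k + 1)
        = Nat.bit (x.testBit 0) (x >>> 1) ||| Nat.bit false (y * 2 ^ k) := by rw [hdecomp, ← h2]
      _ = Nat.bit (x.testBit 0 || false) ((x >>> 1) ||| (y * 2 ^ k)) := Nat.lor_bit _ _ _ _
      _ = Nat.bit (x.testBit 0) ((x >>> 1) + y * 2 ^ k) := by rw [Bool.or_false, ih _ _ hx2]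
      _ = x + y * 2 ^ (k + 1) := by
          rw [Nat.bit_val] at hdecomp ⊢
          rw [Nat.shiftRight_one] at hdecomp ⊢
          rw [hpow]
          omega

/-- one bit-or step of A's packing is an addition, when the accumulator fits below bit k. -/
lemma bor_step (r a : Int) (k : Nat) (hr0 : 0 ≤ r) (hrk : r < 2 ^ k) (ha : 0 ≤ a) :
    PySem.Int.bor r (a <<< k) = r + a * 2 ^ k := by
  obtain ⟨rn, rfl⟩ : ∃ n : Nat, r = (n : Int) := ⟨r.toNat, (Int.toNat_of_nonneg hr0).symm⟩
  obtain ⟨an, rfl⟩ : ∃ n : Nat, a = (n : Int) := ⟨a.toNat, (Int.toNat_of_nonneg ha).symm⟩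
  have hsh : (an : Int) <<< k = ((an * 2 ^ k : Nat) : Int) := by
    rw [Int.shiftLeft_eq]; push_cast; ring
  have hrn : rn < 2 ^ k := by exact_mod_cast hrk
  rw [hsh, PySem.Int.bor_natCast, lor_disjoint k rn an hrn]
  push_cast; ring

/-- A's enumerate/shift/bit-or fold equals the Horner sum, for 3-bit values. -/
lemma pack_eq (L : List Int) (i : Nat) (r : Int)
    (hL : ∀ v ∈ L, 0 ≤ v ∧ v < 8) (hr0 : 0 ≤ r) (hr : r < 2 ^ (3 * i)) :
    (PySem.List.enumerate L (i : Int)).foldl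
      (fun retval p => PySem.Int.bor retval (p.2 <<< (3 * p.1).toNat)) r =
    r + 2 ^ (3 * i) * (L.foldr (fun v acc => acc * 8 + v) 0) := by
  induction L generalizing i r with
  | nil => simp [PySem.List.enumerate_nil]
  | cons a t ih =>
    rw [PySem.List.enumerate_cons, List.foldl_cons]
    obtain ⟨ha0, ha8⟩ := hL a List.mem_cons_self
    have hexp : ((3 * (i : Int)).toNat) = 3 * i := by omega
    simp only [hexp]
    rw [bor_step r a (3 * i) hr0 hr ha0]
    have hP : (0 : Int) < 2 ^ (3 * i) := by positivity
    have h8 : (2 : Int) ^ (3 * (i + 1)) = 2 ^ (3 * i) * 8 := by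
      rw [show 3 * (i + 1) = 3 * i + 3 from by ring, pow_add]; norm_num
    have hstep0 : 0 ≤ r + a * 2 ^ (3 * i) := by positivity
    have hstep : r + a * 2 ^ (3 * i) < 2 ^ (3 * (i + 1)) := by
      rw [h8]; nlinarith
    have hcast : (i : Int) + 1 = ((i + 1 : Nat) : Int) := by push_cast; ring
    rw [hcast, ih (i + 1) _ (fun v hv => hL v (List.mem_cons_of_mem _ hv)) hstep0 hstep,
      List.foldr_cons, h8]
    ring

/-- A's packing fold, as used with start index 0 and accumulator 0. -/
def pvPack (L : List Int) : Int :=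
  (PySem.List.enumerate L 0).foldl
    (fun retval p => PySem.Int.bor retval (p.2 <<< (3 * p.1).toNat)) 0

/-- A's three-way truncate/pad step. -/
def pvFinal (S : List Int) : List Int :=
  if ((S.length : Int)) > 5 then PySem.List.slice S (some (-5)) none
  else if ((S.length : Int)) < 5 ∧ ((S.length : Int)) > 0 then
    List.replicate (5 - ((S.length : Int))).toNat (PySem.List.pyGetD S 0 0) ++ S
  else S

lemma A_eq (choise : List Int) :
    compressed_choices choise =
      pvPack (pvFinal (PySem.List.sorted (choise.map pvClamp) (fun x => x) false)) := by
  unfold compressed_choices pvPack pvFinal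
  rw [show choise.map (fun c =>
      let c1 := if c < 1 then (1 : Int) else c
      if c1 > 5 then (5 : Int) else c1) = choise.map pvClamp from
    List.map_congr_left (fun c _ => clampA_eq c)]

lemma B_eq (choise : List Int) :
    compressed_choices_alt choise =
      (PySem.List.slice
        (List.replicate 5 (PySem.List.pyGetD
            (List.replicate ((choise.map pvClamp).count 1) 1 ++
             List.replicate ((choise.map pvClamp).count 2) 2 ++
             List.replicate ((choise.map pvClamp).count 3) 3 ++
             List.replicate ((choise.map pvClamp).count 4) 4 ++
             List.replicate ((choise.map pvClamp).count 5) 5) 0 0) ++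
          (List.replicate ((choise.map pvClamp).count 1) 1 ++
           List.replicate ((choise.map pvClamp).count 2) 2 ++
           List.replicate ((choise.map pvClamp).count 3) 3 ++
           List.replicate ((choise.map pvClamp).count 4) 4 ++
           List.replicate ((choise.map pvClamp).count 5) 5)) (some (-5)) none).reverse.foldl
        (fun retval v => retval * 8 + v) 0 := by
  unfold compressed_choices_alt
  rw [show List.replicate 6 (0 : Int) = [0, 0, 0, 0, 0, 0] from rfl,
    tally_fold choise 0 0 0 0 0 0]
  simp only [zero_add]
  rw [seq_fold]

-- ===== VERDICT (by name: the statement is the Claim_ definition above) =====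
theorem compressed_choices_spec : Claim_equal_compressed_choices := by
  intro choise _ hpre
  unfold Spec_compressed_choices
  have hall : ∀ x ∈ choise.map pvClamp, 1 ≤ x ∧ x ≤ 5 := by
    intro x hx
    rcases List.mem_map.mp hx with ⟨c, _, rfl⟩
    exact pvClamp_mem c
  have hR := sorted_counting (choise.map pvClamp) hall
  rw [A_eq, B_eq, ← hR]
  set S := PySem.List.sorted (choise.map pvClamp) (fun x => x) false with hSdef
  have hSne : S ≠ [] := by
    rw [hSdef, Ne, PySem.List.sorted_eq_nil_iff, List.map_eq_nil_iff]
    exact hpre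
  have hallS : ∀ v ∈ S, 1 ≤ v ∧ v ≤ 5 := by
    intro v hv
    exact hall v ((PySem.List.mem_sorted _ _ _ _).mp (hSdef ▸ hv))
  have hmemL : ∀ v ∈ PySem.List.slice
      (List.replicate 5 (PySem.List.pyGetD S 0 0) ++ S) (some (-5)) none, 0 ≤ v ∧ v < 8 := by
    intro v hv
    have hv' := PySem.List.mem_of_mem_slice _ _ _ hv
    rcases List.mem_append.mp hv' with hl | hr
    · have hh : PySem.List.pyGetD S 0 0 ∈ S := by
        apply PySem.List.pyGetD_mem
        have hpos : 0 < S.length := List.length_pos_of_ne_nil hSne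
        exact ⟨by omega, by exact_mod_cast hpos⟩
      have hb := hallS _ hh
      have hveq : v = PySem.List.pyGetD S 0 0 := (List.mem_replicate.mp hl).2
      omega
    · have hb := hallS v hr
      omega
  unfold pvFinal
  rw [lists_eq S hSne]
  unfold pvPack
  have hp := pack_eq (PySem.List.slice (List.replicate 5 (PySem.List.pyGetD S 0 0) ++ S)
      (some (-5)) none) 0 0 hmemL (le_refl 0) (by norm_num)
  norm_num at hp
  rw [hp, List.foldl_reverse]
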